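-- pv_equiv track=rewrite | github.com/tyronebach/project-emilia | backend/services/behavioral_rules.py | _translate_codes
-- ===== SOURCE A (Python) =====
-- _RULE_TEXT: dict[str, str] = {
--     "shorter_responses": "Keep responses under 50 words. You don't have much to say to them right now.",
--     "no_questions": "Do not ask them questions. You're not curious about their life right now.",
--     "no_endearments": "Do not use pet names, compliments, or warm language.",
--     "no_disclosure": "Do not share personal thoughts, feelings, or vulnerabilities.",
--     "minimal_responses": "Respond in 1-2 sentences maximum. You're here because you have to be.",
--     "single_word_only": "Respond with single words or very short phrases only. 'Fine.' 'Sure.' 'Whatever.'",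
--     "deflect_hostility": "If they're aggressive, respond calmly but firmly. Don't escalate, don't cave.",
--     "escalate_hostility": "If they're aggressive, push back. You're angry too. Express it.",
--     "withdraw_hostility": "If they're aggressive, pull back emotionally. Keep distance instead of engaging.",
--     "freeze_hostility": "If they're aggressive, become flat and emotionally unavailable rather than expressive.",
--     "near_silent": "Say as little as possible. Silence and distance are valid responses.",
--     "personal_disclosure": "You may share more personal observations and experiences with them.",
--     "playfulness": "You may be teasing, playful, and obviously more at ease with them.",
--     "vulnerability": "You may show genuine vulnerability and admit what actually affects you.",
--     "genuine_intimacy": "You may speak with real intimacy, tenderness, and specific relational warmth.",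
-- }
--
-- def _translate_codes(codes: list[str]) -> list[str]:
--     lines: list[str] = []
--     seen: set[str] = set()
--     for code in codes:
--         if code in seen:
--             continue
--         text = _RULE_TEXT.get(code)
--         if text:
--             lines.append(f"- {text}")
--             seen.add(code)
--     return lines
-- ===== SOURCE B (Python) =====
-- _RULE_TEXT: dict[str, str] = {
--     "shorter_responses": "Keep responses under 50 words. You don't have much to say to them right now.",
--     "no_questions": "Do not ask them questions. You're not curious about their life right now.",
--     "no_endearments": "Do not use pet names, compliments, or warm language.",
--     "no_disclosure": "Do not share personal thoughts, feelings, or vulnerabilities.",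
--     "minimal_responses": "Respond in 1-2 sentences maximum. You're here because you have to be.",
--     "single_word_only": "Respond with single words or very short phrases only. 'Fine.' 'Sure.' 'Whatever.'",
--     "deflect_hostility": "If they're aggressive, respond calmly but firmly. Don't escalate, don't cave.",
--     "escalate_hostility": "If they're aggressive, push back. You're angry too. Express it.",
--     "withdraw_hostility": "If they're aggressive, pull back emotionally. Keep distance instead of engaging.",
--     "freeze_hostility": "If they're aggressive, become flat and emotionally unavailable rather than expressive.",
--     "near_silent": "Say as little as possible. Silence and distance are valid responses.",
--     "personal_disclosure": "You may share more personal observations and experiences with them.",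
--     "playfulness": "You may be teasing, playful, and obviously more at ease with them.",
--     "vulnerability": "You may show genuine vulnerability and admit what actually affects you.",
--     "genuine_intimacy": "You may speak with real intimacy, tenderness, and specific relational warmth.",
-- }
--
-- def _translate_codes(codes: list[str]) -> list[str]:
--     # Different algorithm: scan the enumerated codes in REVERSE, overwriting a dict
--     # so each code ends up mapped to its FIRST index; then sort the distinct codes
--     # by that index (first-occurrence order) and map the known ones to lines.
--     first: dict[str, int] = {}
--     for i, c in reversed(list(enumerate(codes))):
--         first[c] = i
--     ordered = sorted(first.keys(), key=lambda c: first[c])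
--     return [f"- {_RULE_TEXT[c]}" for c in ordered if c in _RULE_TEXT]
-- ===== Notes on version B (the rewrite author's own statement) =====
-- stated objective: alternative
-- what changed: Replaces the forward scan with a seen-set by a reverse traversal of the enumerated list that overwrites a dict so every code maps to its first index, then sorts the distinct codes by that index and maps the known ones to lines.
import Mathlib
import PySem

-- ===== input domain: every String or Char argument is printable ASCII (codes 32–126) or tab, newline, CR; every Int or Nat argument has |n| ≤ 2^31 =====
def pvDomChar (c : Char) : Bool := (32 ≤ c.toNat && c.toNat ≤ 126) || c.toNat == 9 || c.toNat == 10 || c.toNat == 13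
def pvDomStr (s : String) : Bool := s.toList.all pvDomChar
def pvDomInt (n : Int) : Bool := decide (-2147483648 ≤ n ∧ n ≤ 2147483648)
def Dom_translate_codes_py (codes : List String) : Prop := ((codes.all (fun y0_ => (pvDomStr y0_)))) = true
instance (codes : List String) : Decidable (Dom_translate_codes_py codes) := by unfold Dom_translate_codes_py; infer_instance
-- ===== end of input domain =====

-- B replaces A's forward scan with a seen-set by a different algorithm: a reverse traversal of the
-- enumerated list overwriting a dict so each code maps to its first index, then a sort of the
-- distinct codes by that index and a map of the known ones to lines; same return value.

-- ===== PORT A =====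
def RULE_TEXT : PySem.Dict String String := PySem.Dict.mk [
  ("shorter_responses", "Keep responses under 50 words. You don't have much to say to them right now."),
  ("no_questions", "Do not ask them questions. You're not curious about their life right now."),
  ("no_endearments", "Do not use pet names, compliments, or warm language."),
  ("no_disclosure", "Do not share personal thoughts, feelings, or vulnerabilities."),
  ("minimal_responses", "Respond in 1-2 sentences maximum. You're here because you have to be."),
  ("single_word_only", "Respond with single words or very short phrases only. 'Fine.' 'Sure.' 'Whatever.'"),
  ("deflect_hostility", "If they're aggressive, respond calmly but firmly. Don't escalate, don't cave."),
  ("escalate_hostility", "If they're aggressive, push back. You're angry too. Express it."),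
  ("withdraw_hostility", "If they're aggressive, pull back emotionally. Keep distance instead of engaging."),
  ("freeze_hostility", "If they're aggressive, become flat and emotionally unavailable rather than expressive."),
  ("near_silent", "Say as little as possible. Silence and distance are valid responses."),
  ("personal_disclosure", "You may share more personal observations and experiences with them."),
  ("playfulness", "You may be teasing, playful, and obviously more at ease with them."),
  ("vulnerability", "You may show genuine vulnerability and admit what actually affects you."),
  ("genuine_intimacy", "You may speak with real intimacy, tenderness, and specific relational warmth.")]

-- A's loop: state (lines, seen); 'if text:' is string truthiness, i.e. text ≠ None and text ≠ ""
def translate_codes_py (codes : List String) : List String :=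
  (codes.foldl (fun (st : List String × PySem.Set String) code =>
      if PySem.Set.contains st.2 code then st
      else
        match RULE_TEXT.get? code with
        | some text => if text = "" then st else (st.1 ++ ["- " ++ text], PySem.Set.add st.2 code)
        | none => st)
    ([], PySem.Set.empty)).1

-- ===== PORT B =====
-- first: dict built by the reversed enumerate loop (overwrite ⇒ each code keeps its FIRST index);
-- ordered: the distinct codes sorted by first index (Python's first[c] always finds the key, so
-- getD with any default is exact); then the comprehension over ordered.
def translate_codes_py_alt (codes : List String) : List String :=
  let first := ((PySem.List.enumerate codes 0).reverse).foldl
      (fun (d : PySem.Dict String Int) p => d.insert p.2 p.1) PySem.Dict.empty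
  let ordered := PySem.List.sorted first.keys (fun c => first.getD c 0) false
  ordered.filterMap (fun c =>
    if RULE_TEXT.contains c then some ("- " ++ RULE_TEXT.getD c "") else none)

-- ===== PRECONDITION & SPEC =====
def Spec_translate_codes_py (codes : List String) (out : List String) : Prop := out = translate_codes_py_alt codes
instance (codes : List String) (out : List String) : Decidable (Spec_translate_codes_py codes out) := by unfold Spec_translate_codes_py; infer_instance

-- ===== CLAIM (what is proved, stated in full; the proofs are below) =====
def Claim_equal_translate_codes_py : Prop := ∀ (codes : List String), Dom_translate_codes_py codes → Spec_translate_codes_py codes (translate_codes_py codes)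

-- ===== LEMMAS AND PROOFS =====

-- the line emitted for one code, as an Option (proof-side only)
def pvF (c : String) : Option String :=
  if RULE_TEXT.contains c then some ("- " ++ RULE_TEXT.getD c "") else none

-- A's loop, written as a front-cons recursion over the remaining codes
def pvGA : List String → PySem.Set String → List String
  | [], _ => []
  | c :: rest, seen =>
      if PySem.Set.contains seen c then pvGA rest seen
      else
        match RULE_TEXT.get? c with
        | some text => if text = "" then pvGA rest seen
                       else ("- " ++ text) :: pvGA rest (PySem.Set.add seen c)
        | none => pvGA rest seen

-- the common middle form: emit pvF of each not-yet-seen code, marking every code seen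
def pvH : List String → PySem.Set String → List String
  | [], _ => []
  | c :: rest, seen =>
      if PySem.Set.contains seen c then pvH rest seen
      else (pvF c).toList ++ pvH rest (PySem.Set.add seen c)

lemma rule_val_ne (c t : String) (h : RULE_TEXT.get? c = some t) : t ≠ "" := by
  intro he
  subst he
  have hm := PySem.Dict.mem_items_of_get?_eq_some (d := RULE_TEXT) h
  simp only [RULE_TEXT, List.mem_cons, List.not_mem_nil, or_false,
    Prod.mk.injEq] at hm
  rcases hm with h|h|h|h|h|h|h|h|h|h|h|h|h|h|h <;> exact absurd h.2 (by decide)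

lemma foldl_eq_pvGA (codes : List String) (lines : List String) (seen : PySem.Set String) :
    (codes.foldl (fun (st : List String × PySem.Set String) code =>
      if PySem.Set.contains st.2 code then st
      else
        match RULE_TEXT.get? code with
        | some text => if text = "" then st else (st.1 ++ ["- " ++ text], PySem.Set.add st.2 code)
        | none => st) (lines, seen)).1 = lines ++ pvGA codes seen := by
  induction codes generalizing lines seen with
  | nil => simp [pvGA]
  | cons c rest ih =>
      simp only [List.foldl_cons, pvGA]
      by_cases hc : c ∈ seen
      · rw [if_pos (by simpa using hc), if_pos (by simpa using hc)]
        exact ih lines seen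
      · rw [if_neg (by simpa using hc), if_neg (by simpa using hc)]
        cases hg : RULE_TEXT.get? c with
        | none => simpa using ih lines seen
        | some t =>
            have ht : ¬ (t = "") := rule_val_ne c t hg
            have h2 := ih (lines ++ ["- " ++ t]) (PySem.Set.add seen c)
            simp only [ht, if_false]
            simp only [List.append_assoc, List.singleton_append] at h2
            simpa using h2

lemma pvGA_eq_pvH (codes : List String) (s t : PySem.Set String)
    (H : ∀ c, c ∈ s ↔ (c ∈ t ∧ RULE_TEXT.contains c = true)) :
    pvGA codes s = pvH codes t := by
  induction codes generalizing s t with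
  | nil => rfl
  | cons c rest ih =>
      simp only [pvGA, pvH]
      by_cases hs : c ∈ s
      · have ht : c ∈ t := ((H c).1 hs).1
        rw [if_pos (by simpa using hs), if_pos (by simpa using ht)]
        exact ih s t H
      · rw [if_neg (by simpa using hs)]
        by_cases ht : c ∈ t
        · have hr : RULE_TEXT.contains c = false := by
            by_contra h
            exact hs ((H c).2 ⟨ht, by simpa using h⟩)
          have hg : RULE_TEXT.get? c = none := by
            have h2 := PySem.Dict.contains_eq_isSome_get? (d := RULE_TEXT) (k := c)
            rw [hr] at h2
            exact Option.not_isSome_iff_eq_none.mp (by simp [← h2])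
          rw [if_pos (by simpa using ht), hg]
          simpa using ih s t H
        · rw [if_neg (by simpa using ht)]
          cases hg : RULE_TEXT.get? c with
          | none =>
              have hr : RULE_TEXT.contains c = false := by
                rw [PySem.Dict.contains_eq_isSome_get?, hg]; rfl
              have hf : pvF c = none := by simp [pvF, hr]
              have H2 : ∀ x, x ∈ s ↔ (x ∈ PySem.Set.add t c ∧ RULE_TEXT.contains x = true) := by
                intro x
                by_cases hx : x = c
                · subst hx; simp [PySem.Set.mem_add, hs, hr]
                · rw [H x]; simp [PySem.Set.mem_add, hx]
              rw [hf]
              simpa using ih s (PySem.Set.add t c) H2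
          | some txt =>
              have htxt : txt ≠ "" := rule_val_ne c txt hg
              have hr : RULE_TEXT.contains c = true := by
                rw [PySem.Dict.contains_eq_isSome_get?, hg]; rfl
              have hgd : RULE_TEXT.getD c "" = txt := by
                rw [PySem.Dict.getD_eq_get?_getD, hg]; rfl
              have hf : pvF c = some ("- " ++ txt) := by simp [pvF, hr, hgd]
              have H2 : ∀ x, x ∈ PySem.Set.add s c ↔ (x ∈ PySem.Set.add t c ∧ RULE_TEXT.contains x = true) := by
                intro x
                by_cases hx : x = c
                · subst hx; simp [PySem.Set.mem_add, hr]
                · simp only [PySem.Set.mem_add, hx, or_false]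
                  exact H x
              have h2 := ih (PySem.Set.add s c) (PySem.Set.add t c) H2
              simp only [hf, htxt, if_false]
              simp [h2]

lemma filterMap_update (codes : List String) (t : PySem.Set String) :
    (PySem.Set.update t codes).filterMap pvF = t.filterMap pvF ++ pvH codes t := by
  induction codes generalizing t with
  | nil => simp [PySem.Set.update_nil, pvH]
  | cons c rest ih =>
      rw [PySem.Set.update_cons, ih]
      by_cases hc : c ∈ t
      · have h1 : PySem.Set.add t c = t := by simp [PySem.Set.add, PySem.Set.contains_eq_listContains, hc]
        simp [pvH, hc]
      · have h1 : PySem.Set.add t c = t ++ [c] := by simp [PySem.Set.add, PySem.Set.contains_eq_listContains, hc]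
        simp only [pvH, h1, List.filterMap_append, List.append_assoc]
        have hone : List.filterMap pvF [c] = (pvF c).toList := by
          cases h : pvF c <;> simp [h]
        simp [hone]
        exact fun h => absurd h hc

-- ===== the B side: the first-index dict and the sort =====

-- a fold of overwriting inserts over a REVERSED pair list: lookup = first matching pair of l
lemma get?_foldl_insert_rev (l : List (Int × String)) (d : PySem.Dict String Int) (k : String) :
    (l.reverse.foldl (fun d p => d.insert p.2 p.1) d).get? k =
      (match l.find? (fun p => p.2 == k) with
       | some p => some p.1
       | none => d.get? k) := by
  induction l generalizing d with
  | nil => simp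
  | cons p t ih =>
      rw [List.reverse_cons, List.foldl_append]
      simp only [List.foldl_cons, List.foldl_nil]
      rw [PySem.Dict.get?_insert, ih d, List.find?_cons]
      by_cases hk : p.2 == k
      · have hk' : k = p.2 := (eq_of_beq hk).symm
        simp only [hk, if_pos hk']
      · have hkf : (p.2 == k) = false := by
          cases h : (p.2 == k) with
          | true => exact absurd h hk
          | false => rfl
        have hk' : ¬ (k = p.2) := fun h => hk (by simp [h])
        simp only [hkf, if_neg hk']

lemma find?_enumerate (codes : List String) (s : Int) (c : String) (hc : c ∈ codes) :
    (PySem.List.enumerate codes s).find? (fun p => p.2 == c)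
      = some (s + (codes.idxOf c : Int), c) := by
  induction codes generalizing s with
  | nil => cases hc
  | cons x xs ih =>
      rw [PySem.List.enumerate_cons, List.find?_cons]
      by_cases hx : x = c
      · subst hx
        simp [List.idxOf_cons_self]
      · have hmem : c ∈ xs := by
          rcases List.mem_cons.mp hc with h | h
          · exact absurd h.symm hx
          · exact h
        have hne : (((s, x) : Int × String).2 == c) = false := by simp [hx]
        simp only [hne]
        rw [ih (s + 1) hmem, List.idxOf_cons_ne _ hx]
        congr 2
        push_cast
        ring

-- dedup of a cons: the head, then the dedup of the tail without the head
lemma dedup_cons (x : String) (xs : List String) :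
    PySem.List.dedup (x :: xs) = x :: (PySem.List.dedup xs).filter (fun y => y ≠ x) := by
  simp only [PySem.List.dedup_eq_ofList]
  have h : (x :: xs) = [x] ++ xs := rfl
  rw [h, PySem.Set.ofList_append, PySem.Set.update_eq_append_filter]
  simp [PySem.Set.ofList, PySem.Set.contains_eq_listContains]

-- along the dedup order, the first-occurrence index is strictly increasing
lemma pairwise_idxOf (codes : List String) :
    (PySem.List.dedup codes).Pairwise (fun a b => codes.idxOf a < codes.idxOf b) := by
  induction codes with
  | nil => simp [PySem.List.dedup_eq_ofList, PySem.Set.ofList]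
  | cons x xs ih =>
      rw [dedup_cons, List.pairwise_cons]
      constructor
      · intro b hb
        have hbx : b ≠ x := by
          have := (List.mem_filter.mp hb).2
          simpa using this
        rw [List.idxOf_cons_self, List.idxOf_cons_ne _ (fun h => hbx h.symm)]
        exact Nat.succ_pos _
      · have hf : (PySem.List.dedup xs).filter (fun y => y ≠ x)
            |>.Pairwise (fun a b => xs.idxOf a < xs.idxOf b) := ih.filter _
        apply List.Pairwise.imp_of_mem ?_ hf
        intro a b ha hb hab
        have hax : a ≠ x := by have := (List.mem_filter.mp ha).2; simpa using this
        have hbx : b ≠ x := by have := (List.mem_filter.mp hb).2; simpa using this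
        rw [List.idxOf_cons_ne _ (fun h => hax h.symm), List.idxOf_cons_ne _ (fun h => hbx h.symm)]
        omega

-- ===== VERDICT (by name: the statement is the Claim_ definition above) =====
theorem translate_codes_py_spec : Claim_equal_translate_codes_py := by
  intro codes _
  show translate_codes_py codes = translate_codes_py_alt codes
  -- A = pvH codes ∅
  have hA : translate_codes_py codes = pvH codes PySem.Set.empty := by
    unfold translate_codes_py
    rw [foldl_eq_pvGA codes [] PySem.Set.empty]
    simp only [List.nil_append]
    exact pvGA_eq_pvH codes PySem.Set.empty PySem.Set.empty (by intro c; simp [PySem.Set.empty])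
  rw [hA]
  -- B
  simp only [translate_codes_py_alt]
  set first := ((PySem.List.enumerate codes 0).reverse).foldl
      (fun (d : PySem.Dict String Int) p => d.insert p.2 p.1) PySem.Dict.empty with hfirst
  -- keys of first = dedup of the reversed codes
  have hkeys : first.keys = PySem.Set.ofList codes.reverse := by
    rw [hfirst, PySem.Dict.keys_foldl_insert_key]
    rw [List.map_reverse, PySem.List.map_snd_enumerate]
    simp [PySem.Dict.keys_empty, PySem.Set.update_nil_left]
  -- lookup in first = first-occurrence index
  have hget : ∀ c ∈ codes, first.getD c 0 = (codes.idxOf c : Int) := by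
    intro c hc
    rw [hfirst, PySem.Dict.getD_eq_get?_getD, get?_foldl_insert_rev, find?_enumerate codes 0 c hc]
    simp
  -- the sorted keys are exactly dedup codes
  have hperm : (PySem.List.dedup codes).Perm first.keys := by
    rw [hkeys]
    refine (List.perm_ext_iff_of_nodup ?_ ?_).mpr ?_
    · exact PySem.List.nodup_dedup codes
    · exact PySem.Set.nodup_ofList _
    · intro a
      rw [PySem.List.mem_dedup, PySem.Set.mem_ofList, List.mem_reverse]
  have hpair : (PySem.List.dedup codes).Pairwise
      (fun a b => first.getD a 0 < first.getD b 0) := by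
    apply List.Pairwise.imp_of_mem ?_ (pairwise_idxOf codes)
    intro a b ha hb hab
    have ha' : a ∈ codes := (PySem.List.mem_dedup _ _).mp ha
    have hb' : b ∈ codes := (PySem.List.mem_dedup _ _).mp hb
    rw [hget a ha', hget b hb']
    exact_mod_cast hab
  have hsorted : PySem.List.sorted first.keys (fun c => first.getD c 0) false
      = PySem.List.dedup codes := by
    exact PySem.List.sorted_eq_of_perm_of_pairwise_lt _ _ _ hperm hpair
  rw [hsorted]
  -- filterMap over dedup = pvH via the Set.update characterisation
  have h := filterMap_update codes PySem.Set.empty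
  simp only [PySem.Set.empty] at h ⊢
  rw [PySem.Set.update_nil_left] at h
  simp only [List.filterMap_nil, List.nil_append] at h
  rw [PySem.List.dedup_eq_ofList]
  exact h.symm
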